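-- pv_equiv track=rewrite | github.com/muradhaji/ProblemSolutions | LeetCode/1816.py | truncateSentence
-- ===== SOURCE A (Python) =====
-- def truncateSentence(s: str, k: int) -> str:
--     count = 0
--     i = 0
--     while i < len(s):
--         if s[i] == ' ': count += 1
--         if count == k: break
--         i += 1
--     return s[:i]
-- ===== SOURCE B (Python) =====
-- def truncateSentence(s: str, k: int) -> str:
--     # Split on the single-space separator (keeps empty segments, matching
--     # Python's duplicate/leading-space behaviour) and rejoin the first k pieces.
--     return ' '.join(s.split(' ')[:k])
-- ===== Notes on version B (the rewrite author's own statement) =====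
-- stated objective: idiomatic
-- what changed: Replaces the manual character scan that counts spaces to locate a cut index with the standard split(' ') / join of the first k segments (same O(n) work, but done by the C-level str.split/join instead of a per-character Python loop). Pre_ excludes k <= 0, where A still returns but its value is an accident of the loop (the whole string when s starts with a space or k is negative, '' otherwise) and B's slice-join value is equally unspecified.
-- outside the precondition, e.g. on truncateSentence(' a', 0): A returns ' a', B returns ''; on truncateSentence('a b c', -1): A returns 'a b c', B returns 'a b'
import Mathlib
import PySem

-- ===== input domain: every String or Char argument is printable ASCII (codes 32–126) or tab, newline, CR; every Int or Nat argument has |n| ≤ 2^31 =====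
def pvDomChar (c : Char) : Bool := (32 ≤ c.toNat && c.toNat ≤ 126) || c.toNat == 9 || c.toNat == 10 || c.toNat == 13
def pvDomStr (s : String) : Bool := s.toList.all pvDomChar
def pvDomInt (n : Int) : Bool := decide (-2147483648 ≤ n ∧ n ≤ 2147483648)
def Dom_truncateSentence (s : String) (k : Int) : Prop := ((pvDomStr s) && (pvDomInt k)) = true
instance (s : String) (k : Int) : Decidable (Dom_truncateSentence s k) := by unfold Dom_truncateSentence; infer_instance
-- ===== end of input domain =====

-- B replaces A's character scan (count spaces, cut at the k-th) with the idiomatic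
-- split-on-' ' / rejoin-first-k-segments; equivalence is proved for k ≥ 1.

-- ===== PORT A =====
-- the while loop: walk the characters, count spaces, stop (returning the current
-- index i) as soon as count == k; recursion over the remaining characters is the loop
def truncSentLoopA (k count : Int) (i : Nat) : List Char → Nat
  | [] => i
  | c :: rest =>
      let count' := if c = ' ' then count + 1 else count
      if count' = k then i else truncSentLoopA k count' (i + 1) rest

def truncateSentence (s : String) (k : Int) : String :=
  -- return s[:i]
  String.mk (PySem.List.slice s.toList none (some ((truncSentLoopA k 0 0 s.toList : Nat) : Int)))

-- ===== PORT B =====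
def truncateSentence_alt (s : String) (k : Int) : String :=
  -- ' '.join(s.split(' ')[:k])
  String.mk (PySem.Chars.join [' '] (PySem.List.slice (PySem.Chars.splitOn s.toList [' ']) none (some k)))

-- ===== PRECONDITION & SPEC =====
-- Pre_ excludes k ≤ 0, where A still returns but its value is an accident of the loop
-- (the whole string when s starts with a space or k is negative, '' otherwise) and
-- B's slice-join value is equally unspecified.
def Pre_truncateSentence (s : String) (k : Int) : Prop := 1 ≤ k
instance (s : String) (k : Int) : Decidable (Pre_truncateSentence s k) := by unfold Pre_truncateSentence; infer_instance
def pvWitness_truncateSentence : String × Int := ("hello world and me", 2)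

def Spec_truncateSentence (s : String) (k : Int) (out : String) : Prop := out = truncateSentence_alt s k
instance (s : String) (k : Int) (out : String) : Decidable (Spec_truncateSentence s k out) := by unfold Spec_truncateSentence; infer_instance

-- ===== CLAIM (what is proved, stated in full; the proofs are below) =====
def Claim_equal_truncateSentence : Prop := ∀ (s : String) (k : Int), Dom_truncateSentence s k → Pre_truncateSentence s k → Spec_truncateSentence s k (truncateSentence s k)

-- ===== LEMMAS AND PROOFS =====

-- proof-only reformulation of A's loop: the number of characters kept when m
-- spaces remain to be seen
def pvScanLen (m : Int) : List Char → Nat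
  | [] => 0
  | c :: rest =>
      let m' := if c = ' ' then m - 1 else m
      if m' = 0 then 0 else pvScanLen m' rest + 1

theorem truncSentLoopA_eq (k : Int) (cs : List Char) : ∀ (count : Int) (i : Nat),
    truncSentLoopA k count i cs = i + pvScanLen (k - count) cs := by
  induction cs with
  | nil => intro count i; simp [truncSentLoopA, pvScanLen]
  | cons c rest ih =>
      intro count i
      simp only [truncSentLoopA, pvScanLen]
      by_cases hc : c = ' '
      · simp only [hc, if_true]
        by_cases hk : count + 1 = k
        · have h0 : k - count - 1 = 0 := by omega
          simp [hk, h0]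
        · have h2 : ¬ (k - count - 1 = 0) := by omega
          have h3 : k - (count + 1) = k - count - 1 := by omega
          rw [if_neg hk, if_neg h2, ih, h3]
          omega
      · rw [if_neg hc, if_neg hc]
        by_cases hk : count = k
        · have h0 : k - count = 0 := by omega
          simp [hk, h0]
        · have h2 : ¬ (k - count = 0) := by omega
          rw [if_neg hk, if_neg h2, ih]
          omega

-- proof-only reformulation of split on a single space
def pvSplitSp : List Char → List (List Char)
  | [] => [[]]
  | c :: cs => if c = ' ' then [] :: pvSplitSp cs else (pvSplitSp cs).modifyHead (c :: ·)

theorem pvSplitSp_ne_nil (cs : List Char) : pvSplitSp cs ≠ [] := by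
  cases cs with
  | nil => simp [pvSplitSp]
  | cons c rest =>
      simp only [pvSplitSp]
      split
      · simp
      · cases h : pvSplitSp rest with
        | nil => exact absurd h (pvSplitSp_ne_nil rest)
        | cons a l => simp

theorem splitOn_go_space (fuel : Nat) : ∀ (l cur : List Char) (acc : List (List Char)),
    l.length < fuel →
    PySem.Chars.splitOn.go [' '] fuel l cur acc
      = acc.reverse ++ (pvSplitSp l).modifyHead (cur.reverse ++ ·) := by
  induction fuel with
  | zero => intro l cur acc h; omega
  | succ f ih =>
      intro l cur acc h
      cases l with
      | nil => simp [PySem.Chars.splitOn.go, pvSplitSp]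
      | cons c rest =>
          simp only [PySem.Chars.splitOn.go]
          by_cases hc : c = ' '
          · have hpre : List.isPrefixOf [' '] (c :: rest) = true := by
              simp [List.isPrefixOf, hc]
            rw [if_pos hpre]
            have := ih rest [] (List.reverse cur :: acc) (by simpa using Nat.lt_of_succ_lt_succ h)
            simp only [List.length_cons] at this ⊢
            simp only [List.length_nil, Nat.zero_add, List.drop_succ_cons, List.drop_zero]
            rw [this]
            simp [pvSplitSp, hc]
            cases hs : pvSplitSp rest with
            | nil => exact absurd hs (pvSplitSp_ne_nil rest)
            | cons a l => simp
          · have hpre : List.isPrefixOf [' '] (c :: rest) = false := by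
              simp [List.isPrefixOf]
              intro h'; exact absurd h'.symm hc
            rw [if_neg (by simp [hpre])]
            have := ih rest (c :: cur) acc (by simpa using Nat.lt_of_succ_lt_succ h)
            rw [this]
            simp only [pvSplitSp, if_neg hc]
            cases hs : pvSplitSp rest with
            | nil => exact absurd hs (pvSplitSp_ne_nil rest)
            | cons a l => simp

theorem splitOn_space (cs : List Char) :
    PySem.Chars.splitOn cs [' '] = pvSplitSp cs := by
  have h := splitOn_go_space (cs.length + 1) cs [] [] (by omega)
  simp only [PySem.Chars.splitOn] at *
  rw [h]
  cases hs : pvSplitSp cs with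
  | nil => exact absurd hs (pvSplitSp_ne_nil cs)
  | cons a l => simp

theorem join_cons_head (c : Char) (h : List Char) (t : List (List Char)) :
    PySem.Chars.join [' '] ((c :: h) :: t) = c :: PySem.Chars.join [' '] (h :: t) := by
  cases t with
  | nil => simp [PySem.Chars.join, List.intercalate]
  | cons b l => simp [PySem.Chars.join, List.intercalate]

theorem main_take (cs : List Char) : ∀ (m : Int), 1 ≤ m →
    cs.take (pvScanLen m cs) = PySem.Chars.join [' '] ((pvSplitSp cs).take m.toNat) := by
  induction cs with
  | nil =>
      intro m hm
      have : m.toNat = (m.toNat - 1) + 1 := by omega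
      rw [this]
      simp [pvScanLen, pvSplitSp, PySem.Chars.join, List.intercalate]
  | cons c rest ih =>
      intro m hm
      have hmn : m.toNat = (m.toNat - 1) + 1 := by omega
      by_cases hc : c = ' '
      · subst hc
        simp only [pvScanLen, pvSplitSp, if_true]
        by_cases h1 : m - 1 = 0
        · have : m.toNat = 1 := by omega
          simp [h1, this, PySem.Chars.join, List.intercalate]
        · have hm2 : 1 ≤ m - 1 := by omega
          rw [if_neg h1, hmn]
          simp only [List.take_succ_cons]
          have h3 : (m - 1).toNat = m.toNat - 1 := by omega
          rw [ih (m - 1) hm2, h3]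
          have hne : (pvSplitSp rest).take (m.toNat - 1) ≠ [] := by
            cases hs : pvSplitSp rest with
            | nil => exact absurd hs (pvSplitSp_ne_nil rest)
            | cons a l =>
                have : m.toNat - 1 = (m.toNat - 2) + 1 := by omega
                rw [this]; simp
          cases ht : (pvSplitSp rest).take (m.toNat - 1) with
          | nil => exact absurd ht hne
          | cons a l => simp [PySem.Chars.join, List.intercalate]
      · simp only [pvScanLen, pvSplitSp, if_neg hc]
        have hne0 : ¬ (m = 0) := by omega
        rw [if_neg hne0]
        cases hs : pvSplitSp rest with
        | nil => exact absurd hs (pvSplitSp_ne_nil rest)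
        | cons a l =>
            rw [hmn]
            simp only [List.modifyHead, List.take_succ_cons]
            rw [join_cons_head]
            have h3 := ih m hm
            rw [hs] at h3
            rw [hmn] at h3
            simp only [List.take_succ_cons] at h3
            rw [h3]

-- ===== VERDICT (by name: the statement is the Claim_ definition above) =====
theorem truncateSentence_spec : Claim_equal_truncateSentence := by
  intro s k _hdom hk
  unfold Spec_truncateSentence truncateSentence truncateSentence_alt
  have hk0 : (0 : Int) ≤ k := by exact le_trans (by norm_num) hk
  rw [truncSentLoopA_eq, splitOn_space,
      PySem.List.slice_to_natCast, PySem.List.slice_to _ hk0]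
  congr 1
  have : k - 0 = k := by omega
  rw [this]
  simpa using main_take s.toList k hk
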